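-- pv_equiv track=rewrite | github.com/yui-mhcp/nlp | models/nlu/nlu_utils.py | _get_key_mapping
-- ===== SOURCE A (Python) =====
-- def _get_key_mapping(keys, alternatives):
--     """
--         Returns a mapping `{key : alternatives}` for all keys in `keys`
--
--         Arguments :
--             - keys  : list of str, the expected keys
--             - alternatives  : list of list / tuple where each tuple contains multiple keys that should be matched to the same key
--         Returns :
--             - mapping   : a dict where the keys are the keys in `keys` and values is the tuple containing the `key`
--     """
--     if not keys: return None
--
--     mapping = {}
--     for k in keys:
--         mapping.setdefault(k, [])
--         for alt in alternatives:
--             if k in alt: mapping[k].extend(alt)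
--     return mapping
-- ===== SOURCE B (Python) =====
-- def _get_key_mapping(keys, alternatives):
--     if not keys:
--         return None
--     # one pass over the alternatives: element -> concatenation of the tuples containing it
--     index = {}
--     for alt in alternatives:
--         for e in dict.fromkeys(alt):
--             index.setdefault(e, []).extend(alt)
--     # one index lookup per key instead of a scan over all alternatives
--     mapping = {}
--     for k in keys:
--         mapping.setdefault(k, []).extend(index.get(k, ()))
--     return mapping
-- ===== Notes on version B (the rewrite author's own statement) =====
-- stated objective: alternative
-- what changed: B builds an element->matches index in one pass over the alternatives and resolves each key by a single dict lookup, instead of A's scan of every alternative for every key.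
import Mathlib
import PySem

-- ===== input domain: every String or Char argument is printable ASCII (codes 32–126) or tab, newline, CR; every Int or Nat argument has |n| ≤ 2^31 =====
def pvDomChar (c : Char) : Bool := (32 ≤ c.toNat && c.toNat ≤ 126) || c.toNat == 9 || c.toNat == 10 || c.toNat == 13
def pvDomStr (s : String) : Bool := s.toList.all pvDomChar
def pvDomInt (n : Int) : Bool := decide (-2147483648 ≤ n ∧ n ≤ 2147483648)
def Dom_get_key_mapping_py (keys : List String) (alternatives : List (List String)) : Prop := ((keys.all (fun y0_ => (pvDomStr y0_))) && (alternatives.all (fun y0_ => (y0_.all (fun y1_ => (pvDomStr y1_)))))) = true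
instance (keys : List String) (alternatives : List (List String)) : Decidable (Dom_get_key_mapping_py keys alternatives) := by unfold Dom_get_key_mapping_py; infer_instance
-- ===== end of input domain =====

-- B replaces A's per-key scan of all alternatives by a one-pass element→matches index, then one dict lookup per key.


-- ===== PORT A =====
def get_key_mapping_py (keys : List String) (alternatives : List (List String)) : Option (List (String × List String)) :=
  if keys = [] then none
  else
    let mapping := keys.foldl (fun m k =>
      let m := m.setdefault k []
      -- mapping[k].extend(alt): k is present (setdefault), so this is d[k] = d.get(k, []) + alt
      alternatives.foldl (fun m alt => if k ∈ alt then m.modify k [] (· ++ alt) else m) m)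
      PySem.Dict.empty
    some mapping.items

-- ===== PORT B =====
def get_key_mapping_py_alt (keys : List String) (alternatives : List (List String)) : Option (List (String × List String)) :=
  if keys = [] then none
  else
    -- index.setdefault(e, []).extend(alt) for e in dict.fromkeys(alt)
    let index := alternatives.foldl (fun idx alt =>
      (PySem.List.dedup alt).foldl (fun idx e => idx.modify e [] (· ++ alt)) idx)
      (PySem.Dict.empty : PySem.Dict String (List String))
    -- mapping.setdefault(k, []).extend(index.get(k, ())): in-place extend of mapping[k]
    let mapping := keys.foldl (fun m k => (m.setdefault k []).modify k [] (· ++ index.getD k []))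
      PySem.Dict.empty
    some mapping.items

-- ===== PRECONDITION & SPEC =====
def Spec_get_key_mapping_py (keys : List String) (alternatives : List (List String)) (out : Option (List (String × List String))) : Prop := out = get_key_mapping_py_alt keys alternatives
instance (keys : List String) (alternatives : List (List String)) (out : Option (List (String × List String))) : Decidable (Spec_get_key_mapping_py keys alternatives out) := by unfold Spec_get_key_mapping_py; infer_instance

-- ===== CLAIM (what is proved, stated in full; the proofs are below) =====
def Claim_equal_get_key_mapping_py : Prop := ∀ (keys : List String) (alternatives : List (List String)), Dom_get_key_mapping_py keys alternatives → Spec_get_key_mapping_py keys alternatives (get_key_mapping_py keys alternatives)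

-- ===== LEMMAS AND PROOFS =====

-- What both programs attach to a key: the concatenation of all alternatives containing it.
def pvMatches (alternatives : List (List String)) (k : String) : List String :=
  (alternatives.filter (fun alt => decide (k ∈ alt))).flatten

-- d.modify is definitionally insert of the modified lookup.
theorem pv_modify_eq_insert (d : PySem.Dict String (List String)) (k : String)
    (f : List String → List String) : d.modify k [] f = d.insert k (f (d.getD k [])) := rfl

-- Inserting a key's own current value changes nothing (unique keys).
theorem pv_insert_getD_self (d : PySem.Dict String (List String)) (k : String)
    (hc : d.contains k = true) (hn : d.keys.Nodup) : d.insert k (d.getD k []) = d := by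
  apply PySem.Dict.ext
  rw [PySem.Dict.items_insert, if_pos hc]
  conv_rhs => rw [← List.map_id d.items]
  apply List.map_congr_left
  intro p hp
  by_cases hpk : p.1 = k
  · obtain ⟨p1, p2⟩ := p
    simp only at hpk
    subst hpk
    have hg := PySem.Dict.getD_of_mem_items d hp hn []
    simp [hg]
  · simp [hpk]

-- Both per-key steps write `old value ++ v` at k, whether or not k is present.
theorem pv_setdefault_modify (m : PySem.Dict String (List String)) (k : String)
    (v : List String) :
    (m.setdefault k []).modify k [] (· ++ v) = m.insert k (m.getD k [] ++ v) := by
  by_cases hc : m.contains k = true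
  · rw [PySem.Dict.setdefault_of_contains m [] hc, pv_modify_eq_insert]
  · have hc' : m.contains k = false := by simpa using hc
    rw [PySem.Dict.setdefault_of_not_contains m [] hc', pv_modify_eq_insert,
        PySem.Dict.getD_insert_self, PySem.Dict.insert_insert_self,
        PySem.Dict.getD_of_not_contains m [] hc']

-- A's inner loop over the alternatives, on a dict already containing k.
theorem pv_innerA (alts : List (List String)) (k : String) :
    ∀ (m : PySem.Dict String (List String)), m.contains k = true → m.keys.Nodup →
      alts.foldl (fun m alt => if k ∈ alt then m.modify k [] (· ++ alt) else m) m
        = m.insert k (m.getD k [] ++ pvMatches alts k) := by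
  induction alts with
  | nil =>
    intro m hc hn
    simp [pvMatches, pv_insert_getD_self m k hc hn]
  | cons a alts ih =>
    intro m hc hn
    by_cases hk : k ∈ a
    · rw [List.foldl_cons, if_pos hk, pv_modify_eq_insert]
      rw [ih _ (PySem.Dict.contains_insert_self _ _ _) (PySem.Dict.nodup_keys_insert _ _ _ hn)]
      rw [PySem.Dict.insert_insert_self, PySem.Dict.getD_insert_self]
      simp [pvMatches, hk]
    · rw [List.foldl_cons, if_neg hk, ih _ hc hn]
      simp [pvMatches, hk]

-- A's per-key step equals the canonical step.
theorem pv_stepA (alts : List (List String)) (k : String)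
    (m : PySem.Dict String (List String)) (hn : m.keys.Nodup) :
    alts.foldl (fun m alt => if k ∈ alt then m.modify k [] (· ++ alt) else m) (m.setdefault k [])
      = m.insert k (m.getD k [] ++ pvMatches alts k) := by
  by_cases hc : m.contains k = true
  · rw [PySem.Dict.setdefault_of_contains m [] hc, pv_innerA alts k m hc hn]
  · have hc' : m.contains k = false := by simpa using hc
    rw [PySem.Dict.setdefault_of_not_contains m [] hc']
    rw [pv_innerA alts k _ (PySem.Dict.contains_insert_self _ _ _)
        (PySem.Dict.nodup_keys_insert _ _ _ hn)]
    rw [PySem.Dict.insert_insert_self, PySem.Dict.getD_insert_self,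
        PySem.Dict.getD_of_not_contains m [] hc']

-- One tuple of B's index pass: each distinct element of `a` gets `a` appended once.
theorem pv_index_step (a : List String) (k : String) :
    ∀ (l : List String), l.Nodup → ∀ (idx : PySem.Dict String (List String)),
      (l.foldl (fun idx e => idx.modify e [] (· ++ a)) idx).getD k []
        = idx.getD k [] ++ (if k ∈ l then a else []) := by
  intro l
  induction l with
  | nil => simp
  | cons e l ih =>
    intro hl idx
    rw [List.foldl_cons, ih hl.of_cons _, PySem.Dict.getD_modify]
    by_cases hke : k = e
    · subst hke
      have hkl : k ∉ l := (List.nodup_cons.mp hl).1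
      simp [hkl]
    · simp [hke, List.mem_cons]

-- B's index maps every key to the concatenation of its matching alternatives.
theorem pv_index_getD (alts : List (List String)) (k : String) :
    ∀ (idx : PySem.Dict String (List String)),
      (alts.foldl (fun idx alt =>
          (PySem.List.dedup alt).foldl (fun idx e => idx.modify e [] (· ++ alt)) idx) idx).getD k []
        = idx.getD k [] ++ pvMatches alts k := by
  induction alts with
  | nil => intro idx; simp [pvMatches]
  | cons a alts ih =>
    intro idx
    rw [List.foldl_cons, ih, pv_index_step a k _ (PySem.List.nodup_dedup a) idx]
    by_cases hk : k ∈ a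
    · simp [pvMatches, hk]
    · simp [pvMatches, hk]

-- Both key loops run the same canonical step, so the dicts agree.
theorem pv_fold_keys (stepv : String → List String) (keys : List String)
    (step : PySem.Dict String (List String) → String → PySem.Dict String (List String))
    (hstep : ∀ m k, m.keys.Nodup → step m k = m.insert k (m.getD k [] ++ stepv k)) :
    ∀ (m : PySem.Dict String (List String)), m.keys.Nodup →
      keys.foldl step m = keys.foldl (fun m k => m.insert k (m.getD k [] ++ stepv k)) m := by
  induction keys with
  | nil => intro m _; rfl
  | cons k keys ih =>
    intro m hn
    simp only [List.foldl_cons]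
    rw [hstep m k hn]
    exact ih _ (PySem.Dict.nodup_keys_insert _ _ _ hn)

-- ===== VERDICT (by name: the statement is the Claim_ definition above) =====
theorem get_key_mapping_py_spec : Claim_equal_get_key_mapping_py := by
  intro keys alternatives _
  unfold Spec_get_key_mapping_py get_key_mapping_py get_key_mapping_py_alt
  by_cases h : keys = []
  · simp [h]
  · simp only [if_neg h]
    have hidx : ∀ k : String,
        (alternatives.foldl (fun idx alt =>
            (PySem.List.dedup alt).foldl (fun idx e => idx.modify e [] (· ++ alt)) idx)
          (PySem.Dict.empty : PySem.Dict String (List String))).getD k []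
          = pvMatches alternatives k := by
      intro k
      rw [pv_index_getD alternatives k PySem.Dict.empty]
      simp
    congr 1
    rw [pv_fold_keys (pvMatches alternatives) keys _
          (fun m k hn => pv_stepA alternatives k m hn) PySem.Dict.empty (by simp)]
    conv_rhs => rw [pv_fold_keys (pvMatches alternatives) keys _
          (fun m k _hn => by simp only [pv_setdefault_modify m k, hidx k]) PySem.Dict.empty (by simp)]
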